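-- pv_equiv track=rewrite | github.com/khegazy/torchpathdiffeq | torchpathdiffeq/adaptivity.py | _remove_idxs_to_ranges
-- ===== SOURCE A (Python) =====
-- def _remove_idxs_to_ranges(idxs_cut):
--     ranges_cut = []
--     range_i = idxs_cut[0]
--     idxC = 0
--     while idxC < len(idxs_cut) - 1:
--         if idxs_cut[idxC+1] - idxs_cut[idxC] > 1:
--             ranges_cut.append((range_i, idxs_cut[idxC]))
--             range_i = idxs_cut[idxC+1]
--         idxC += 1
--     ranges_cut.append((range_i, idxs_cut[-1]))
--
--     return ranges_cut
-- ===== SOURCE B (Python) =====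
-- def _remove_idxs_to_ranges(idxs_cut):
--     breaks = [i for i in range(len(idxs_cut) - 1) if idxs_cut[i + 1] - idxs_cut[i] > 1]
--     starts = [idxs_cut[0]] + [idxs_cut[b + 1] for b in breaks]
--     ends = [idxs_cut[b] for b in breaks] + [idxs_cut[-1]]
--     return list(zip(starts, ends))
-- ===== Notes on version B (the rewrite author's own statement) =====
-- stated objective: alternative
-- what changed: Replaces the single mutating running-accumulator scan with a two-phase shape: first a boundary table of gap positions, then range start/end lists built from those boundaries and zipped; comprehensions/zip give a constant-factor speedup over the index-by-index while loop.
import Mathlib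
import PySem

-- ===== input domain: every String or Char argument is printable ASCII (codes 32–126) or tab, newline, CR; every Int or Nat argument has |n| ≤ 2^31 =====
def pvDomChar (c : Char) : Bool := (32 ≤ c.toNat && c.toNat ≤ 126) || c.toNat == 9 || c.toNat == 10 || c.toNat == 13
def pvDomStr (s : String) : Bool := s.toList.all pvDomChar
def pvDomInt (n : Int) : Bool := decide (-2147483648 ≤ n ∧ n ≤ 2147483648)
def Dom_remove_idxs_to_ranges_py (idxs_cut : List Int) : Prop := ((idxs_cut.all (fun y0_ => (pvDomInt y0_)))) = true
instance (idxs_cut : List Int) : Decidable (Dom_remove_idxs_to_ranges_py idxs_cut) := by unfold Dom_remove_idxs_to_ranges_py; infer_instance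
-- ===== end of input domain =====

-- B replaces A's single mutating running-accumulator scan by a boundary-table-then-construct
-- two-phase build (gap positions, then zipped start/end lists); same O(n) cost.


-- ===== PORT A =====
-- A: while-loop over idxC = 0 .. len-2, carrying (ranges_cut, range_i); appends the final range after.
def remove_idxs_to_ranges_py (idxs_cut : List Int) : List (Int × Int) :=
  let step : (List (Int × Int) × Int) → Nat → (List (Int × Int) × Int) := fun st idxC =>
    if idxs_cut.getD (idxC + 1) 0 - idxs_cut.getD idxC 0 > 1 then
      (st.1 ++ [(st.2, idxs_cut.getD idxC 0)], idxs_cut.getD (idxC + 1) 0)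
    else st
  let fin := (List.range (idxs_cut.length - 1)).foldl step ([], idxs_cut.headD 0)
  fin.1 ++ [(fin.2, idxs_cut.getLastD 0)]

-- ===== PORT B =====
-- B: boundary table of gap positions, then start/end lists built from it and zipped.
def remove_idxs_to_ranges_py_alt (idxs_cut : List Int) : List (Int × Int) :=
  let breaks := (List.range (idxs_cut.length - 1)).filter
    (fun i => idxs_cut.getD (i + 1) 0 - idxs_cut.getD i 0 > 1)
  let starts := idxs_cut.headD 0 :: breaks.map (fun b => idxs_cut.getD (b + 1) 0)
  let ends := breaks.map (fun b => idxs_cut.getD b 0) ++ [idxs_cut.getLastD 0]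
  starts.zip ends

-- ===== PRECONDITION & SPEC =====
-- Pre_ excludes only the empty list, on which A raises IndexError (idxs_cut[0]).
def Pre_remove_idxs_to_ranges_py (idxs_cut : List Int) : Prop := idxs_cut ≠ []
instance (idxs_cut : List Int) : Decidable (Pre_remove_idxs_to_ranges_py idxs_cut) := by unfold Pre_remove_idxs_to_ranges_py; infer_instance
def pvWitness_remove_idxs_to_ranges_py : List Int := ([1, 2, 4, 5, 9] : List Int)

def Spec_remove_idxs_to_ranges_py (idxs_cut : List Int) (out : List (Int × Int)) : Prop := out = remove_idxs_to_ranges_py_alt idxs_cut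
instance (idxs_cut : List Int) (out : List (Int × Int)) : Decidable (Spec_remove_idxs_to_ranges_py idxs_cut out) := by unfold Spec_remove_idxs_to_ranges_py; infer_instance

-- ===== CLAIM (what is proved, stated in full; the proofs are below) =====
def Claim_equal_remove_idxs_to_ranges_py : Prop := ∀ (idxs_cut : List Int), Dom_remove_idxs_to_ranges_py idxs_cut → Pre_remove_idxs_to_ranges_py idxs_cut → Spec_remove_idxs_to_ranges_py idxs_cut (remove_idxs_to_ranges_py idxs_cut)

-- ===== LEMMAS AND PROOFS =====

/-- Invariant linking A's accumulator scan with B's break-table construction: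
for any index list `L`, finishing the fold and appending the final range equals
the zip of the break-derived start/end lists, relative to accumulator and current start. -/
theorem fold_zip_key (f g : Nat → Int) (L : List Nat) (acc : List (Int × Int)) (ri e : Int) :
    (let fin := L.foldl (fun st i => if f i - g i > 1 then (st.1 ++ [(st.2, g i)], f i) else st) (acc, ri)
     fin.1 ++ [(fin.2, e)]) =
    acc ++ ((ri :: (L.filter (fun i => f i - g i > 1)).map f).zip
            ((L.filter (fun i => f i - g i > 1)).map g ++ [e])) := by
  induction L generalizing acc ri with
  | nil => simp
  | cons i L ih =>
    by_cases h : f i - g i > 1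
    · simp only [List.foldl_cons, List.filter_cons, h, if_pos, decide_true]
      rw [ih]
      simp
    · simp only [List.foldl_cons, List.filter_cons, h, decide_false]
      rw [ih]
      simp

-- ===== VERDICT (by name: the statement is the Claim_ definition above) =====
theorem remove_idxs_to_ranges_py_spec : Claim_equal_remove_idxs_to_ranges_py := by
  intro idxs_cut _ _
  unfold Spec_remove_idxs_to_ranges_py remove_idxs_to_ranges_py remove_idxs_to_ranges_py_alt
  simp only []
  rw [fold_zip_key]
  simp
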